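-- pv_equiv track=rewrite | github.com/patfeng/LMNegatives | sample/sample.py | forward_chain
-- ===== SOURCE A (Python) =====
-- def forward_chain(rules, facts): #### CANNOT BE TRUE AND NOT TRUE, RETURN FAILURE AND RETRY IN process_example ????
--     res = {}
--     for fact in facts:
--         res[fact] = 0
--
--     depth = 1
--     prev_len = 0
--     while len(res) > prev_len:
--         new_facts = []
--         for rule in rules:
--             head, tail = rule
--             if all([lit in res for lit in head]):
--                 new_facts.append(tail)
--         prev_len = len(res)
--         for fact in new_facts:
--             if fact not in res:
--                 res[fact] = depth
--         depth += 1
--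
--     return res
-- ===== SOURCE B (Python) =====
-- def forward_chain(rules, facts):
--     # Agenda-style forward chaining: keep only not-yet-fired rules, each with its
--     # not-yet-derived premises, and per layer check those premises only against the
--     # facts derived in the previous layer.
--     res = {}
--     for fact in facts:
--         res[fact] = 0
--
--     pending = [(list(head), tail) for head, tail in rules]
--     frontier = list(res)
--     depth = 1
--     while frontier:
--         fset = set(frontier)
--         still = []
--         frontier = []
--         for rem, tail in pending:
--             rem = [lit for lit in rem if lit not in fset]
--             if rem:
--                 still.append((rem, tail))
--             else:
--                 if tail not in res:
--                     res[tail] = depth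
--                     frontier.append(tail)
--         pending = still
--         depth += 1
--     return res
-- ===== Notes on version B (the rewrite author's own statement) =====
-- stated objective: alternative
-- what changed: A rescans every rule and every premise against the whole fact dict on each BFS layer; B keeps an agenda of not-yet-fired rules, each holding only its not-yet-derived premises, and checks those only against the previous layer's newly derived facts, dropping a rule once it fires.
import Mathlib
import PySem

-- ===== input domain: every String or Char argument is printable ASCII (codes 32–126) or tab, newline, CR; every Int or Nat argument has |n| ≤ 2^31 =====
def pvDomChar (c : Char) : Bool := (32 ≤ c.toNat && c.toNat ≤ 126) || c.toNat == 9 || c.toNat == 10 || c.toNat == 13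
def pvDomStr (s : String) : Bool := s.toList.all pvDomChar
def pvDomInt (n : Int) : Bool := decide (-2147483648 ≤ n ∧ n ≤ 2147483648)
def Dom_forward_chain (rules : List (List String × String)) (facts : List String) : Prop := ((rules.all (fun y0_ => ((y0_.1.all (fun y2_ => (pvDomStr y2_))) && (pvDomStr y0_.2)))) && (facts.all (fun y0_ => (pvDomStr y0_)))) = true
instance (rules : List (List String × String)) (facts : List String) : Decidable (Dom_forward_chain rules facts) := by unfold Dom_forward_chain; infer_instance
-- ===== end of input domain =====

-- B replaces A's per-layer rescan of every rule and every premise against the whole fact dict by an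
-- agenda: only not-yet-fired rules stay pending, each keeping only its not-yet-derived premises, which
-- are checked against the previous layer's new facts only (same return value, different algorithm).

-- ===== PORT A =====
-- new_facts = [tail for (head, tail) in rules if all(lit in res for lit in head)]
def fcA_layer (rules : List (List String × String)) (res : PySem.Dict String Int) : List String :=
  rules.foldl (fun acc rule =>
    if rule.1.all (fun lit => res.contains lit) then acc ++ [rule.2] else acc) []

-- for fact in new_facts: if fact not in res: res[fact] = depth
def fcA_add (res : PySem.Dict String Int) (depth : Int) (new_facts : List String) : PySem.Dict String Int :=
  new_facts.foldl (fun d fact => if d.contains fact then d else d.insert fact depth) res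

-- while len(res) > prev_len: …   (fuel ≥ number of iterations: each iteration past the first
-- needs a strictly larger dict, and only the rules' tails can be added, so rules.length + 2 suffices)
def fcA_loop (rules : List (List String × String)) :
    Nat → PySem.Dict String Int → Nat → Int → PySem.Dict String Int
  | 0, res, _, _ => res
  | fuel+1, res, prevLen, depth =>
    if prevLen < res.size then
      fcA_loop rules fuel (fcA_add res depth (fcA_layer rules res)) res.size (depth + 1)
    else res

def forward_chain (rules : List (List String × String)) (facts : List String) : List (String × Int) :=
  (fcA_loop rules (rules.length + 2)
    (facts.foldl (fun d fact => d.insert fact (0 : Int)) PySem.Dict.empty) 0 1).items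

-- ===== PORT B =====
-- loop body over one pending rule: drop the premises found in the previous layer; a rule with no
-- premises left fires (its tail is added at the current depth if new), otherwise it stays pending
def fcB_body (depth : Int) (fset : PySem.Set String)
    (st : PySem.Dict String Int × List (List String × String) × List String)
    (p : List String × String) :
    PySem.Dict String Int × List (List String × String) × List String :=
  let rem := p.1.filter (fun lit => !(fset.contains lit))
  if !rem.isEmpty then
    (st.1, st.2.1 ++ [(rem, p.2)], st.2.2)
  else if st.1.contains p.2 then st
  else (st.1.insert p.2 depth, st.2.1, st.2.2 ++ [p.2])

-- while frontier: …   (same fuel bound as A's loop)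
def fcB_loop : Nat → PySem.Dict String Int → List (List String × String) → List String → Int →
    PySem.Dict String Int
  | 0, res, _, _, _ => res
  | fuel+1, res, pending, frontier, depth =>
    if frontier.isEmpty then res
    else
      let fset := PySem.Set.ofList frontier
      let st := pending.foldl (fcB_body depth fset) (res, [], [])
      fcB_loop fuel st.1 st.2.1 st.2.2 (depth + 1)

def forward_chain_alt (rules : List (List String × String)) (facts : List String) : List (String × Int) :=
  let res : PySem.Dict String Int := facts.foldl (fun d fact => d.insert fact (0 : Int)) PySem.Dict.empty
  let pending := rules.map (fun r => (r.1, r.2))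
  (fcB_loop (rules.length + 2) res pending res.keys 1).items

-- ===== PRECONDITION & SPEC =====
def Spec_forward_chain (rules : List (List String × String)) (facts : List String) (out : List (String × Int)) : Prop := out = forward_chain_alt rules facts
instance (rules : List (List String × String)) (facts : List String) (out : List (String × Int)) : Decidable (Spec_forward_chain rules facts out) := by unfold Spec_forward_chain; infer_instance

-- ===== CLAIM (what is proved, stated in full; the proofs are below) =====
def Claim_equal_forward_chain : Prop := ∀ (rules : List (List String × String)) (facts : List String), Dom_forward_chain rules facts → Spec_forward_chain rules facts (forward_chain rules facts)

-- ===== LEMMAS AND PROOFS =====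

-- proof-side abbreviations: a rule's premises not yet in the fact set O, and the residual pending list
def fcRem (O : List String) (h : List String) : List String := h.filter (fun lit => !O.contains lit)

def fcPend (rules : List (List String × String)) (O : List String)
    (skip : (List String × String) → Bool) : List (List String × String) :=
  rules.filterMap (fun r => if (fcRem O r.1).isEmpty && skip r then none else some (fcRem O r.1, r.2))

-- A's add loop with the list of newly inserted keys tracked alongside
def fcAddT (depth : Int) (st : PySem.Dict String Int × List String) (fact : String) :
    PySem.Dict String Int × List String :=
  if st.1.contains fact then st else (st.1.insert fact depth, st.2 ++ [fact])

def fcNew (depth : Int) (xs : List String) (res : PySem.Dict String Int) : List String :=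
  (xs.foldl (fcAddT depth) (res, [])).2

-- structural equations
theorem fcA_add_cons (res : PySem.Dict String Int) (depth : Int) (x : String) (xs : List String) :
    fcA_add res depth (x :: xs) =
      if res.contains x then fcA_add res depth xs else fcA_add (res.insert x depth) depth xs := by
  unfold fcA_add
  rw [List.foldl_cons]
  split <;> rfl

theorem fcAddT_shift (depth : Int) (xs : List String) :
    ∀ (res : PySem.Dict String Int) (nf : List String),
      xs.foldl (fcAddT depth) (res, nf) = (fcA_add res depth xs, nf ++ fcNew depth xs res) := by
  induction xs with
  | nil => intro res nf; simp [fcA_add, fcNew]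
  | cons x xs ih =>
    intro res nf
    rw [List.foldl_cons]
    by_cases h : res.contains x = true
    · have hx : fcAddT depth (res, nf) x = (res, nf) := by simp [fcAddT, h]
      have hx0 : fcAddT depth (res, ([] : List String)) x = (res, []) := by simp [fcAddT, h]
      rw [hx, ih res nf, fcA_add_cons, if_pos h]
      have hnew : fcNew depth (x :: xs) res = fcNew depth xs res := by
        simp only [fcNew, List.foldl_cons, hx0]
      rw [hnew]
    · have hb : res.contains x = false := by simpa using h
      have hx : fcAddT depth (res, nf) x = (res.insert x depth, nf ++ [x]) := by simp [fcAddT, hb]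
      have hx0 : fcAddT depth (res, ([] : List String)) x = (res.insert x depth, [x]) := by
        simp [fcAddT, hb]
      rw [hx, ih (res.insert x depth) (nf ++ [x]), fcA_add_cons, if_neg (by simp [hb])]
      have hnew : fcNew depth (x :: xs) res = [x] ++ fcNew depth xs (res.insert x depth) := by
        simp only [fcNew, List.foldl_cons, hx0, ih (res.insert x depth) [x]]
      rw [hnew]
      simp

theorem fcNew_cons (depth : Int) (x : String) (xs : List String) (res : PySem.Dict String Int) :
    fcNew depth (x :: xs) res =
      if res.contains x then fcNew depth xs res else x :: fcNew depth xs (res.insert x depth) := by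
  by_cases h : res.contains x = true
  · rw [if_pos h]
    simp only [fcNew, List.foldl_cons]
    have hx0 : fcAddT depth (res, ([] : List String)) x = (res, []) := by simp [fcAddT, h]
    rw [hx0]
  · have hb : res.contains x = false := by simpa using h
    rw [if_neg h]
    simp only [fcNew, List.foldl_cons]
    have hx0 : fcAddT depth (res, ([] : List String)) x = (res.insert x depth, [x]) := by
      simp [fcAddT, hb]
    rw [hx0, fcAddT_shift]
    rfl

-- size / membership facts about the add loop
theorem fcA_add_size (depth : Int) (xs : List String) :
    ∀ res : PySem.Dict String Int, (fcA_add res depth xs).size = res.size + (fcNew depth xs res).length := by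
  induction xs with
  | nil => intro res; simp [fcA_add, fcNew]
  | cons x xs ih =>
    intro res
    rw [fcA_add_cons, fcNew_cons]
    by_cases h : res.contains x = true
    · rw [if_pos h, if_pos h, ih]
    · have hb : res.contains x = false := by simpa using h
      rw [if_neg h, if_neg h, ih]
      rw [PySem.Dict.size_insert]
      simp [hb]
      omega

theorem fcA_add_contains (depth : Int) (xs : List String) (l : String) :
    ∀ res : PySem.Dict String Int,
      (fcA_add res depth xs).contains l = (res.contains l || (fcNew depth xs res).contains l) := by
  induction xs with
  | nil => intro res; simp [fcA_add, fcNew]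
  | cons x xs ih =>
    intro res
    rw [fcA_add_cons, fcNew_cons]
    by_cases h : res.contains x = true
    · rw [if_pos h, if_pos h, ih]
    · have hb : res.contains x = false := by simpa using h
      rw [if_neg h, if_neg h, ih]
      rw [PySem.Dict.contains_insert]
      simp only [List.contains_cons]
      cases l == x <;> cases res.contains l <;> simp

theorem fcA_add_contains_mono (depth : Int) (xs : List String) (l : String) :
    ∀ res : PySem.Dict String Int, res.contains l = true → (fcA_add res depth xs).contains l = true := by
  intro res h
  rw [fcA_add_contains]
  simp [h]

theorem fcA_add_contains_mem (depth : Int) (xs : List String) (t : String) (ht : t ∈ xs) :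
    ∀ res : PySem.Dict String Int, (fcA_add res depth xs).contains t = true := by
  induction xs with
  | nil => cases ht
  | cons x xs ih =>
    intro res
    rw [fcA_add_cons]
    rcases List.mem_cons.mp ht with h1 | h2
    · subst h1
      by_cases h : res.contains t = true
      · rw [if_pos h]; exact fcA_add_contains_mono depth xs t res h
      · have hb : res.contains t = false := by simpa using h
        rw [if_neg h]
        exact fcA_add_contains_mono depth xs t _ (PySem.Dict.contains_insert_self res t depth)
    · split <;> exact ih h2 _

-- A's layer is the filtered tails of the satisfied rules
theorem fcA_layer_eq (rules : List (List String × String)) (res : PySem.Dict String Int) :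
    fcA_layer rules res =
      (rules.filter (fun r => r.1.all (fun lit => res.contains lit))).map (·.2) := by
  unfold fcA_layer
  simpa using PySem.List.foldl_append_if
    (fun (r : List String × String) => r.1.all (fun lit => res.contains lit)) (fun r => r.2) rules []

theorem fcAddT_fst_mono (depth : Int) (x l : String) (st : PySem.Dict String Int × List String)
    (h : st.1.contains l = true) : (fcAddT depth st x).1.contains l = true := by
  unfold fcAddT
  split
  · exact h
  · rw [PySem.Dict.contains_insert]; simp [h]

theorem fcAll_isEmpty (xs : List String) (p : String → Bool) :
    xs.all p = (xs.filter (fun x => !p x)).isEmpty := by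
  induction xs with
  | nil => rfl
  | cons x xs ih => cases h : p x <;> simp [h, ih]

-- dropping tails that are already present does not change the tracked add loop
theorem fcAddT_filter_eq (depth : Int) :
    ∀ (l : List (List String × String)) (res : PySem.Dict String Int) (nf : List String)
      (p q : (List String × String) → Bool),
      (∀ r ∈ l, p r = true → q r = true) →
      (∀ r ∈ l, q r = true → p r = false → res.contains r.2 = true) →
      ((l.filter q).map (·.2)).foldl (fcAddT depth) (res, nf) =
        ((l.filter p).map (·.2)).foldl (fcAddT depth) (res, nf) := by
  intro l
  induction l with
  | nil => intro res nf p q _ _; rfl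
  | cons r l ih =>
    intro res nf p q h1 h2
    by_cases hq : q r = true
    · by_cases hp : p r = true
      · simp only [List.filter_cons, hq, hp, if_pos, List.map_cons, List.foldl_cons]
        rcases hst : fcAddT depth (res, nf) r.2 with ⟨res', nf'⟩
        refine ih res' nf' p q (fun a ha hpa => h1 a (List.mem_cons_of_mem r ha) hpa) ?_
        intro a ha hqa hpa
        have hc := h2 a (List.mem_cons_of_mem r ha) hqa hpa
        have := fcAddT_fst_mono depth r.2 a.2 (res, nf) hc
        rw [hst] at this
        exact this
      · have hp' : p r = false := by simpa using hp
        have hc := h2 r (List.mem_cons_self) hq hp'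
        simp only [List.filter_cons, hq, hp', if_pos, Bool.false_eq_true, if_neg,
          List.map_cons, List.foldl_cons]
        have hst : fcAddT depth (res, nf) r.2 = (res, nf) := by simp [fcAddT, hc]
        rw [hst]
        exact ih res nf p q (fun a ha hpa => h1 a (List.mem_cons_of_mem r ha) hpa)
          (fun a ha hqa hpa => h2 a (List.mem_cons_of_mem r ha) hqa hpa)
    · have hq' : q r = false := by simpa using hq
      have hp' : p r = false := by
        cases hpv : p r
        · rfl
        · exact absurd (h1 r List.mem_cons_self hpv) (by simp [hq'])
      simp only [List.filter_cons, hq', hp', Bool.false_eq_true, if_neg]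
      exact ih res nf p q (fun a ha hpa => h1 a (List.mem_cons_of_mem r ha) hpa)
        (fun a ha hqa hpa => h2 a (List.mem_cons_of_mem r ha) hqa hpa)

theorem fcB_body_eq (depth : Int) (fset : PySem.Set String)
    (st : PySem.Dict String Int × List (List String × String) × List String)
    (p : List String × String) :
    fcB_body depth fset st p =
      if (fcRem fset p.1).isEmpty then
        ((fcAddT depth (st.1, st.2.2) p.2).1, st.2.1, (fcAddT depth (st.1, st.2.2) p.2).2)
      else (st.1, st.2.1 ++ [(fcRem fset p.1, p.2)], st.2.2) := by
  have hrem : (p.1.filter (fun lit => !(PySem.Set.contains fset lit))) = fcRem fset p.1 := by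
    unfold fcRem
    apply List.filter_congr
    intro a _
    rw [PySem.Set.contains_eq_listContains]
  unfold fcB_body
  simp only [hrem]
  by_cases he : (fcRem fset p.1).isEmpty = true
  · rw [if_pos he, he]
    simp only [Bool.not_true]
    rw [if_neg (by decide)]
    unfold fcAddT
    by_cases hc : st.1.contains p.2 = true
    · rw [if_pos hc, if_pos hc]
    · rw [if_neg hc, if_neg hc]
  · have he' : (fcRem fset p.1).isEmpty = false := by simpa using he
    rw [if_neg he, he']
    simp only [Bool.not_false]
    rw [if_pos (by trivial)]

theorem fcB_layer_eq (depth : Int) (fset : PySem.Set String) :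
    ∀ (pending : List (List String × String)) (res : PySem.Dict String Int)
      (still : List (List String × String)) (nf : List String),
      pending.foldl (fcB_body depth fset) (res, still, nf) =
        (((((pending.filter (fun p => (fcRem fset p.1).isEmpty)).map (·.2)).foldl (fcAddT depth) (res, nf)).1),
         still ++ pending.filterMap (fun p =>
           if (fcRem fset p.1).isEmpty then none else some (fcRem fset p.1, p.2)),
         ((((pending.filter (fun p => (fcRem fset p.1).isEmpty)).map (·.2)).foldl (fcAddT depth) (res, nf)).2)) := by
  intro pending
  induction pending with
  | nil => intro res still nf; simp
  | cons p l ih =>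
    intro res still nf
    rw [List.foldl_cons, fcB_body_eq]
    by_cases he : (fcRem fset p.1).isEmpty = true
    · rw [if_pos he]
      simp only [List.filter_cons, he, if_pos, List.map_cons, List.foldl_cons,
        List.filterMap_cons, he]
      rcases hst : fcAddT depth (res, nf) p.2 with ⟨res', nf'⟩
      have := ih res' still nf'
      simpa [hst] using this
    · have he' : (fcRem fset p.1).isEmpty = false := by simpa using he
      rw [if_neg he]
      simp only [List.filter_cons, he', Bool.false_eq_true, if_neg, List.filterMap_cons, he']
      rw [ih res (still ++ [(fcRem fset p.1, p.2)]) nf]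
      simp

-- residual composition
theorem fcRem_append (O F h : List String) : fcRem F (fcRem O h) = fcRem (O ++ F) h := by
  unfold fcRem
  rw [List.filter_filter]
  apply List.filter_congr
  intro a _
  rw [List.contains_append]
  cases O.contains a <;> cases F.contains a <;> rfl

theorem fcPend_cons (r : List String × String) (rs : List (List String × String))
    (O : List String) (skip : (List String × String) → Bool) :
    fcPend (r :: rs) O skip =
      (if (fcRem O r.1).isEmpty && skip r then [] else [(fcRem O r.1, r.2)]) ++ fcPend rs O skip := by
  unfold fcPend
  rw [List.filterMap_cons]
  by_cases hc : ((fcRem O r.1).isEmpty && skip r) = true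
  · rw [if_pos hc, if_pos hc, List.nil_append]
  · rw [if_neg hc, if_neg hc, List.singleton_append]

theorem fcPend_filter (rules : List (List String × String)) (O F : List String)
    (skip : (List String × String) → Bool) :
    (fcPend rules O skip).filter (fun p => (fcRem F p.1).isEmpty) =
      (rules.filter (fun r => !((fcRem O r.1).isEmpty && skip r) && (fcRem (O ++ F) r.1).isEmpty)).map
        (fun r => (fcRem O r.1, r.2)) := by
  induction rules with
  | nil => rfl
  | cons r rs ih =>
    rw [fcPend_cons, List.filter_cons]
    by_cases hc : ((fcRem O r.1).isEmpty && skip r) = true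
    · rw [if_pos hc, List.nil_append, ih]
      have hcond : (!((fcRem O r.1).isEmpty && skip r) && (fcRem (O ++ F) r.1).isEmpty) = false := by
        rw [hc]; rfl
      rw [hcond]
      rw [if_neg (by decide)]
    · rw [if_neg hc, List.singleton_append, List.filter_cons]
      have hc' : ((fcRem O r.1).isEmpty && skip r) = false := by simpa using hc
      have hr : fcRem F (fcRem O r.1) = fcRem (O ++ F) r.1 := fcRem_append O F r.1
      cases he : (fcRem (O ++ F) r.1).isEmpty
      · have h1 : ((fcRem F ((fcRem O r.1, r.2).1)).isEmpty) = false := by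
          show (fcRem F (fcRem O r.1)).isEmpty = false
          rw [hr, he]
        rw [h1, if_neg (by decide), Bool.and_false, if_neg (by decide)]
        exact ih
      · have h1 : ((fcRem F ((fcRem O r.1, r.2).1)).isEmpty) = true := by
          show (fcRem F (fcRem O r.1)).isEmpty = true
          rw [hr, he]
        rw [h1, if_pos rfl, Bool.and_true]
        have hcond : (!((fcRem O r.1).isEmpty && skip r)) = true := by rw [hc']; rfl
        rw [hcond, if_pos rfl, List.map_cons, ih]

theorem fcPend_step (rules : List (List String × String)) (O F : List String)
    (skip : (List String × String) → Bool) :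
    (fcPend rules O skip).filterMap (fun p =>
        if (fcRem F p.1).isEmpty then none else some (fcRem F p.1, p.2)) =
      fcPend rules (O ++ F) (fun _ => true) := by
  induction rules with
  | nil => rfl
  | cons r rs ih =>
    rw [fcPend_cons, fcPend_cons]
    have hr : fcRem F (fcRem O r.1) = fcRem (O ++ F) r.1 := fcRem_append O F r.1
    by_cases hc : ((fcRem O r.1).isEmpty && skip r) = true
    · have hOe : (fcRem O r.1).isEmpty = true := ((Bool.and_eq_true _ _).mp hc).1
      have hOFe : (fcRem (O ++ F) r.1).isEmpty = true := by
        rw [← hr]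
        rw [List.isEmpty_iff] at hOe ⊢
        rw [hOe]; rfl
      rw [if_pos hc, if_pos (by rw [hOFe]; rfl), List.nil_append, List.nil_append]
      exact ih
    · rw [if_neg hc, List.singleton_append, List.filterMap_cons]
      cases he : (fcRem (O ++ F) r.1).isEmpty
      · have h1 : ((fcRem F ((fcRem O r.1, r.2).1)).isEmpty) = false := by
          show (fcRem F (fcRem O r.1)).isEmpty = false
          rw [hr, he]
        rw [h1, if_neg (by decide)]
        have h2 : fcRem F ((fcRem O r.1, r.2).1) = fcRem (O ++ F) r.1 := hr
        rw [h2, if_neg (by decide), List.singleton_append, ih]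
      · have h1 : ((fcRem F ((fcRem O r.1, r.2).1)).isEmpty) = true := by
          show (fcRem F (fcRem O r.1)).isEmpty = true
          rw [hr, he]
        rw [h1, if_pos rfl, if_pos (by decide), List.nil_append, ih]

theorem fcSat_eq (r : List String × String) (res : PySem.Dict String Int) (K : List String)
    (hmem : ∀ l, res.contains l = K.contains l) :
    (r.1.all (fun lit => res.contains lit)) = (fcRem K r.1).isEmpty := by
  unfold fcRem
  rw [fcAll_isEmpty]
  congr 1
  apply List.filter_congr
  intro a _
  rw [hmem]

theorem fcSet_ofList_contains (F : List String) (l : String) :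
    (PySem.Set.ofList F).contains l = F.contains l := by
  rw [PySem.Set.contains_eq_listContains, List.contains_eq_mem, List.contains_eq_mem]
  simp [PySem.Set.mem_ofList]

theorem fcDict_contains_keys (d : PySem.Dict String Int) (l : String) :
    d.contains l = d.keys.contains l := by
  rw [PySem.Dict.contains_eq_decide_mem_keys, List.contains_eq_mem]

theorem fcRem_congr (O O' : List String) (hc : ∀ l, O.contains l = O'.contains l)
    (h : List String) : fcRem O h = fcRem O' h := by
  unfold fcRem
  apply List.filter_congr
  intro a _
  rw [hc]

-- the synchronized loop simulation
theorem fc_loop_eq (rules : List (List String × String)) :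
    ∀ (fuel : Nat) (O : List String) (skip : (List String × String) → Bool)
      (res : PySem.Dict String Int) (pending : List (List String × String))
      (frontier : List String) (prevLen : Nat) (depth : Int),
      pending = fcPend rules O skip →
      (∀ r ∈ rules, (fcRem O r.1).isEmpty = true → skip r = true → res.contains r.2 = true) →
      (∀ l, res.contains l = (O.contains l || frontier.contains l)) →
      res.size = prevLen + frontier.length →
      fcA_loop rules fuel res prevLen depth = fcB_loop fuel res pending frontier depth := by
  intro fuel
  induction fuel with
  | zero =>
    intro O skip res pending frontier prevLen depth _ _ _ _
    rfl
  | succ fuel ih =>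
    intro O skip res pending frontier prevLen depth hpend hskip hmem hlen
    subst hpend
    rw [fcA_loop, fcB_loop]
    by_cases hfe : frontier.isEmpty = true
    · have hnil : frontier = [] := List.isEmpty_iff.mp hfe
      have hnlt : ¬ prevLen < res.size := by
        rw [hnil] at hlen
        simp at hlen
        omega
      rw [if_neg hnlt, if_pos hfe]
    · have hne : frontier ≠ [] := by
        intro h
        rw [h] at hfe
        exact hfe rfl
      have hlt : prevLen < res.size := by
        have := List.length_pos_of_ne_nil hne
        omega
      rw [if_pos hlt, if_neg hfe]
      simp only [fcB_layer_eq depth (PySem.Set.ofList frontier) (fcPend rules O skip) res [] []]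
      have hfs : ∀ (h : List String), fcRem (PySem.Set.ofList frontier) h = fcRem frontier h :=
        fcRem_congr _ _ (fun l => fcSet_ofList_contains frontier l)
      simp only [hfs]
      try rw [List.nil_append]
      rw [fcPend_filter rules O frontier skip, fcPend_step rules O frontier skip]
      have hmm : ((rules.filter (fun r => !((fcRem O r.1).isEmpty && skip r) &&
            (fcRem (O ++ frontier) r.1).isEmpty)).map (fun r => (fcRem O r.1, r.2))).map
            (fun x => x.2) =
          (rules.filter (fun r => !((fcRem O r.1).isEmpty && skip r) &&
            (fcRem (O ++ frontier) r.1).isEmpty)).map (fun r => r.2) := by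
        rw [List.map_map]
        rfl
      rw [hmm]
      have hmem' : ∀ l, res.contains l = (O ++ frontier).contains l := by
        intro l
        rw [hmem, List.contains_append]
      -- replace B's fired fold by A's full fold over the satisfied rules
      have hfold := fcAddT_filter_eq depth rules res []
        (fun r => !((fcRem O r.1).isEmpty && skip r) && (fcRem (O ++ frontier) r.1).isEmpty)
        (fun r => (fcRem (O ++ frontier) r.1).isEmpty)
        (fun r _ hp => (Bool.and_eq_true _ _).mp hp |>.2)
        (by
          intro r hr hq hp
          have hq2 : (fcRem (O ++ frontier) r.1).isEmpty = true := hq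
          have hp2 : (!((fcRem O r.1).isEmpty && skip r) &&
              (fcRem (O ++ frontier) r.1).isEmpty) = false := hp
          have h1 : ((fcRem O r.1).isEmpty && skip r) = true := by
            cases hv : ((fcRem O r.1).isEmpty && skip r)
            · rw [hv, hq2] at hp2
              simp at hp2
            · rfl
          exact hskip r hr ((Bool.and_eq_true _ _).mp h1).1 ((Bool.and_eq_true _ _).mp h1).2)
      rw [← hfold]
      -- identify A's layer with the satisfied-rule tails
      have hlayer : fcA_layer rules res =
          (rules.filter (fun r => (fcRem (O ++ frontier) r.1).isEmpty)).map (fun r => r.2) := by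
        rw [fcA_layer_eq]
        congr 1
        apply List.filter_congr
        intro r _
        exact fcSat_eq r res (O ++ frontier) hmem'
      rw [fcAddT_shift, List.nil_append]
      dsimp only
      rw [← hlayer]
      exact ih (O ++ frontier) (fun _ => true) _ _ _ _ _ rfl
        (by
          intro r hr he _
          rw [hlayer]
          apply fcA_add_contains_mem
          exact List.mem_map_of_mem (List.mem_filter.mpr ⟨hr, he⟩)
        )
        (by
          intro l
          rw [fcA_add_contains, hmem, List.contains_append]
        )
        (by rw [fcA_add_size])

theorem fcPend_init (rules : List (List String × String)) :
    rules.map (fun r => (r.1, r.2)) = fcPend rules [] (fun _ => false) := by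
  have hnil : ∀ h : List String, fcRem [] h = h := by
    intro h
    unfold fcRem
    simp
  unfold fcPend
  induction rules with
  | nil => rfl
  | cons r rs ih =>
    rw [List.map_cons, List.filterMap_cons]
    rw [Bool.and_false]
    rw [if_neg (by decide), hnil]
    rw [ih]

-- ===== VERDICT (by name: the statement is the Claim_ definition above) =====
theorem forward_chain_spec : Claim_equal_forward_chain := by
  unfold Claim_equal_forward_chain Spec_forward_chain
  intro rules facts _
  unfold forward_chain forward_chain_alt
  dsimp only
  congr 1
  apply fc_loop_eq rules (rules.length + 2) [] (fun _ => false)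
  · exact fcPend_init rules
  · intro r _ _ hsk
    exact absurd hsk (by decide)
  · intro l
    rw [fcDict_contains_keys]
    rfl
  · simp [PySem.Dict.size, PySem.Dict.keys]
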